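-- pv_equiv track=rewrite | github.com/tinkerer-red/CPP-to-GML-Bridger | parser.py | get_enum_prefix_suffix_cleanup
-- ===== SOURCE A (Python) =====
-- def strip_common_prefix(enum_name, entries):
--     parts = [k.split('_') for k in entries if '_' in k]
--     common = []
--     for i in zip(*parts):
--         if all(p == i[0] for p in i):
--             common.append(i[0])
--         else:
--             break
--     return '_'.join(common) + '_' if common else ''
--
-- def get_enum_prefix_suffix_cleanup(enum_keys):
--     keys = list(enum_keys)
--     prefix = strip_common_prefix("", keys)
--
--     suffixes = [k.split('_')[-1] for k in keys if '_' in k]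
--     suffix = None
--     if len(suffixes) == len(keys) and all(s == suffixes[0] for s in suffixes):
--         sfx = suffixes[0]
--         if sfx.isupper() and len(sfx) >= 2:
--             suffix = f"_{sfx}"
--
--     return prefix, suffix
-- ===== SOURCE B (Python) =====
-- def _lcp(xs, ys):
--     out = []
--     for x, y in zip(xs, ys):
--         if x != y:
--             break
--         out.append(x)
--     return out
--
-- def get_enum_prefix_suffix_cleanup(enum_keys):
--     keys = list(enum_keys)
--     run = None          # longest common leading-segment list of the '_'-containing keys
--     lasts = []          # their last segments, in order
--     n_us = 0
--     for k in keys: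
--         if '_' in k:
--             n_us += 1
--             segs = k.split('_')
--             lasts.append(segs[-1])
--             run = segs if run is None else _lcp(run, segs)
--     prefix = '_'.join(run) + '_' if run else ''
--     suffix = None
--     if lasts and n_us == len(keys) and all(s == lasts[0] for s in lasts):
--         sfx = lasts[0]
--         if sfx.isupper() and len(sfx) >= 2:
--             suffix = f"_{sfx}"
--     return prefix, suffix
-- ===== Notes on version B (the rewrite author's own statement) =====
-- stated objective: alternative
-- what changed: B computes the common prefix by a single left fold that truncates a running segment list pairwise (and collects last segments and the underscore count in the same pass), instead of A's materialising all split lists, transposing them with zip(*) and scanning columns.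
-- outside the precondition, e.g. on get_enum_prefix_suffix_cleanup([]): A raises IndexError, B returns ('', None)
import Mathlib
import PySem

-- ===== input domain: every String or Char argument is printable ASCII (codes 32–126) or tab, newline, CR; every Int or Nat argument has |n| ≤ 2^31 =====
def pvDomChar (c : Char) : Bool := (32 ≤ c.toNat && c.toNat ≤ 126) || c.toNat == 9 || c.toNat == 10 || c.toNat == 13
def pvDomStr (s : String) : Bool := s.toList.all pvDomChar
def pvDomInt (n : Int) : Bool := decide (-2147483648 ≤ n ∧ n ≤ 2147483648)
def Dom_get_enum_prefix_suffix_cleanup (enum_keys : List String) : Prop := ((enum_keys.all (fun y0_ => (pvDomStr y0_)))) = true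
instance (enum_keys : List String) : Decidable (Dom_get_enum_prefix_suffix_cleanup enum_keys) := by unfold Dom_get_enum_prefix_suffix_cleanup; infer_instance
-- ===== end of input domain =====

-- B replaces A's zip(*)-column scan of the split key lists by one fold that pairwise-truncates
-- a running prefix (objective: alternative decomposition, same cost).

-- ===== PORT A =====
-- shared primitives, used verbatim by both ports:
-- '_' in k
def pvHasU (k : String) : Bool := PySem.Str.isIn "_" k
-- k.split('_'); the separator "_" is nonempty so split? is always `some`
def pvSplitU (k : String) : List String := (PySem.Str.split? k "_").getD []
-- s.isupper(): exact on the ASCII domain, where the cased characters are exactly the letters: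
-- at least one letter and no lowercase letter
def pvIsUpper (s : String) : Bool :=
  s.toList.any (fun c => PySem.Chars.isalpha c) && s.toList.all (fun c => !PySem.Chars.islower c)

-- zip(*parts): take the heads of all lists as long as every list is nonempty
def pvZipStar : List (List String) → List (List String)
  | [] => []
  | p :: ps =>
    if (p :: ps).all (fun q => !q.isEmpty) then
      (p :: ps).map (fun q => q.headD "") :: pvZipStar (p.tail :: ps.map (fun q => q.tail))
    else []
termination_by l => (l.headD []).length
decreasing_by
  simp_all
  cases p <;> simp_all

-- A's loop over the columns: append i[0] while all(p == i[0] for p in i), else break.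
-- (zip(*parts) only yields nonempty tuples, so the `[] :: _` case is unreachable.)
def pvCollect : List (List String) → List String
  | [] => []
  | [] :: _ => []
  | (c :: cs) :: rest => if (c :: cs).all (fun p => p == c) then c :: pvCollect rest else []

def strip_common_prefix (_enum_name : String) (entries : List String) : String :=
  let parts := (entries.filter pvHasU).map pvSplitU
  let common := pvCollect (pvZipStar parts)
  if common.isEmpty then "" else PySem.Str.join "_" common ++ "_"

def get_enum_prefix_suffix_cleanup (enum_keys : List String) : String × Option String :=
  let keys := enum_keys
  let pfx := strip_common_prefix "" keys
  -- k.split('_')[-1]: split always returns a nonempty list, so [-1] is the last element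
  let suffixes := (keys.filter pvHasU).map (fun k => (pvSplitU k).getLastD "")
  let suffix : Option String :=
    if suffixes.length == keys.length && suffixes.all (fun s => s == suffixes.headD "") then
      -- suffixes[0]; nonempty under Pre_ (keys ≠ []) whenever this branch is reached
      let sfx := suffixes.headD ""
      if pvIsUpper sfx && decide (2 ≤ PySem.Str.len sfx) then some ("_" ++ sfx) else none
    else none
  (pfx, suffix)

-- ===== PORT B =====
-- _lcp(xs, ys): common leading segments of the two lists
def pvLcp : List String → List String → List String
  | x :: xs, y :: ys => if x == y then x :: pvLcp xs ys else []
  | _, _ => []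

-- run = segs if run is None else _lcp(run, segs)
def pvMerge (r : Option (List String)) (segs : List String) : Option (List String) :=
  some (match r with | none => segs | some rr => pvLcp rr segs)

-- the body of B's single loop over the keys; state = (run, lasts, n_us)
def pvAltStep (st : Option (List String) × List String × Nat) (k : String) :
    Option (List String) × List String × Nat :=
  if pvHasU k then
    let segs := pvSplitU k
    (pvMerge st.1 segs, st.2.1 ++ [segs.getLastD ""], st.2.2 + 1)
  else st

def get_enum_prefix_suffix_cleanup_alt (enum_keys : List String) : String × Option String :=
  let keys := enum_keys
  let st := keys.foldl pvAltStep (none, [], 0)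
  let pfx := match st.1 with
    | none => ""
    | some r => if r.isEmpty then "" else PySem.Str.join "_" r ++ "_"
  let lasts := st.2.1
  let suffix : Option String :=
    if !lasts.isEmpty && st.2.2 == keys.length && lasts.all (fun s => s == lasts.headD "") then
      let sfx := lasts.headD ""
      if pvIsUpper sfx && decide (2 ≤ PySem.Str.len sfx) then some ("_" ++ sfx) else none
    else none
  (pfx, suffix)

-- ===== PRECONDITION & SPEC =====
-- Pre_ excludes only the empty list, on which A raises IndexError (suffixes[0] of an empty list).
def Pre_get_enum_prefix_suffix_cleanup (enum_keys : List String) : Prop := enum_keys ≠ []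
instance (enum_keys : List String) : Decidable (Pre_get_enum_prefix_suffix_cleanup enum_keys) := by unfold Pre_get_enum_prefix_suffix_cleanup; infer_instance
def pvWitness_get_enum_prefix_suffix_cleanup : List String := ["COLOR_RED", "COLOR_GREEN"]

def Spec_get_enum_prefix_suffix_cleanup (enum_keys : List String) (out : String × Option String) : Prop := out = get_enum_prefix_suffix_cleanup_alt enum_keys
instance (enum_keys : List String) (out : String × Option String) : Decidable (Spec_get_enum_prefix_suffix_cleanup enum_keys out) := by unfold Spec_get_enum_prefix_suffix_cleanup; infer_instance

-- ===== CLAIM (what is proved, stated in full; the proofs are below) =====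
def Claim_equal_get_enum_prefix_suffix_cleanup : Prop := ∀ (enum_keys : List String), Dom_get_enum_prefix_suffix_cleanup enum_keys → Pre_get_enum_prefix_suffix_cleanup enum_keys → Spec_get_enum_prefix_suffix_cleanup enum_keys (get_enum_prefix_suffix_cleanup enum_keys)
-- ===== LEMMAS AND PROOFS =====

-- proof-only abbreviations for the pieces both sides compute
def pvParts (keys : List String) : List (List String) := (keys.filter pvHasU).map pvSplitU
def pvFoldRun (run : Option (List String)) (keys : List String) : Option (List String) :=
  (pvParts keys).foldl pvMerge run
def pvSfx (keys : List String) : List String := (pvParts keys).map (fun p => p.getLastD "")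

-- B's single pass = (fold of pvMerge over the split '_'-keys, their last segments, their count)
theorem pvFold_eq (keys : List String) : ∀ (run : Option (List String)) (lasts : List String) (n : Nat),
    keys.foldl pvAltStep (run, lasts, n) =
      (pvFoldRun run keys, lasts ++ pvSfx keys, n + (keys.filter pvHasU).length) := by
  induction keys with
  | nil => intro run lasts n; simp [pvFoldRun, pvSfx, pvParts]
  | cons k ks ih =>
    intro run lasts n
    by_cases h : pvHasU k = true
    · simp [List.foldl_cons, pvAltStep, h, ih, pvFoldRun, pvSfx, pvParts]
      omega
    · simp [List.foldl_cons, pvAltStep, h, ih, pvFoldRun, pvSfx, pvParts]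

theorem pvFoldRun_some (ps : List (List String)) : ∀ (r : List String),
    ps.foldl pvMerge (some r) = some (ps.foldl pvLcp r) := by
  induction ps with
  | nil => intro r; rfl
  | cons p ps ih => intro r; simp [List.foldl_cons, pvMerge, ih]

theorem pvZipStar_nil : pvZipStar [] = [] := by rw [pvZipStar]

theorem pvZipStar_cons (p : List String) (ps : List (List String)) :
    pvZipStar (p :: ps) =
      if (p :: ps).all (fun q => !q.isEmpty) then
        (p :: ps).map (fun q => q.headD "") :: pvZipStar (p.tail :: ps.map (fun q => q.tail))
      else [] := by rw [pvZipStar]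

theorem pvCollect_single (p : List String) : pvCollect (pvZipStar [p]) = p := by
  induction p with
  | nil => rw [pvZipStar_cons]; simp [pvCollect]
  | cons x xs ih => rw [pvZipStar_cons]; simp [pvCollect, ih]


theorem pvZipStar_head_nil (rest : List (List String)) : pvZipStar ([] :: rest) = [] := by
  rw [pvZipStar_cons]; simp

theorem pvCollect_reduce (p : List String) : ∀ (q : List String) (rest : List (List String)),
    pvCollect (pvZipStar (p :: q :: rest)) = pvCollect (pvZipStar (pvLcp p q :: rest)) := by
  induction p with
  | nil =>
    intro q rest
    rw [pvZipStar_head_nil, show pvLcp [] q = [] from by simp [pvLcp], pvZipStar_head_nil]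
  | cons x xs ih =>
    intro q rest
    cases q with
    | nil =>
      rw [show pvLcp (x :: xs) [] = [] from by simp [pvLcp], pvZipStar_head_nil]
      rw [pvZipStar_cons]
      simp [pvCollect]
    | cons y ys =>
      by_cases hxy : x = y
      · subst hxy
        rw [show pvLcp (x :: xs) (x :: ys) = x :: pvLcp xs ys from by simp [pvLcp]]
        conv_lhs => rw [pvZipStar_cons]
        conv_rhs => rw [pvZipStar_cons]
        by_cases hrest : rest.all (fun r => !r.isEmpty) = true
        · simp only [List.all_cons, List.isEmpty_cons, Bool.not_false, Bool.true_and, hrest,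
            if_true, List.map_cons, List.headD, List.tail_cons]
          simp only [pvCollect, List.all_cons, BEq.rfl, Bool.true_and]
          split_ifs with h
          · exact congrArg (x :: ·) (ih ys (rest.map (fun q => q.tail)))
          · rfl
        · simp [hrest]
      · rw [show pvLcp (x :: xs) (y :: ys) = [] from by simp [pvLcp, hxy], pvZipStar_head_nil]
        rw [pvZipStar_cons]
        by_cases hrest : rest.all (fun r => !r.isEmpty) = true
        · simp [hrest, pvCollect, Ne.symm hxy]
        · simp [hrest]

theorem pvCollect_foldl (ps : List (List String)) : ∀ (p : List String),
    pvCollect (pvZipStar (p :: ps)) = ps.foldl pvLcp p := by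
  induction ps with
  | nil => intro p; simpa using pvCollect_single p
  | cons q ps ih => intro p; rw [pvCollect_reduce, ih, List.foldl_cons]

-- ===== VERDICT (by name: the statement is the Claim_ definition above) =====
theorem get_enum_prefix_suffix_cleanup_spec : Claim_equal_get_enum_prefix_suffix_cleanup := by
  intro keys _hdom hpre
  unfold Spec_get_enum_prefix_suffix_cleanup
  simp only [get_enum_prefix_suffix_cleanup, get_enum_prefix_suffix_cleanup_alt,
    strip_common_prefix, pvFold_eq, List.nil_append, Nat.zero_add]
  have hsfx : pvSfx keys = (keys.filter pvHasU).map (fun k => (pvSplitU k).getLastD "") := by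
    simp [pvSfx, pvParts, List.map_map]
  have hlen : ((keys.filter pvHasU).map (fun k => (pvSplitU k).getLastD "")).length
      = (keys.filter pvHasU).length := by simp
  -- prefix halves agree
  have hpref :
      (if (pvCollect (pvZipStar (pvParts keys))).isEmpty then ""
        else PySem.Str.join "_" (pvCollect (pvZipStar (pvParts keys))) ++ "_") =
      (match pvFoldRun none keys with
        | none => ""
        | some r => if r.isEmpty then "" else PySem.Str.join "_" r ++ "_") := by
    cases hp : pvParts keys with
    | nil => simp [pvFoldRun, hp, pvZipStar_nil, pvCollect]
    | cons p ps =>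
      have hrun : pvFoldRun none keys = some (ps.foldl pvLcp p) := by
        simp [pvFoldRun, hp, List.foldl_cons, pvMerge, pvFoldRun_some]
      rw [hrun, pvCollect_foldl]
  -- suffix halves agree (B's extra nonemptiness test follows from the length test and keys ≠ [])
  have hne : keys.length ≠ 0 := by
    cases keys with
    | nil => exact absurd rfl hpre
    | cons a l => simp
  refine Prod.ext ?_ ?_
  · simpa [pvParts] using hpref
  · simp only [hsfx]
    rw [show (List.filter pvHasU keys).length
        = ((keys.filter pvHasU).map (fun k => (pvSplitU k).getLastD "")).length from hlen.symm]
    set L := (keys.filter pvHasU).map (fun k => (pvSplitU k).getLastD "") with hL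
    have hLb : (L.length == keys.length && L.all (fun s => s == L.headD ""))
        = (!L.isEmpty && (L.length == keys.length) && L.all (fun s => s == L.headD "")) := by
      by_cases h : L.length = keys.length
      · have hE : L.isEmpty = false := by
          rw [List.isEmpty_eq_false_iff, ← List.length_pos_iff]; omega
        simp [h, hE]
      · have hF : (L.length == keys.length) = false := by simpa using h
        simp [hF]
    rw [hLb]
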